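-- pv_equiv track=rewrite | github.com/weiqi-kids/water-intel | lib/sentiment.py | _estimate_position
-- ===== SOURCE A (Python) =====
-- def _estimate_position(tokens: list[str], keyword: str) -> int:
--     """估計關鍵字在 token 序列中的位置"""
--     keyword_lower = keyword.lower()
--
--     for i, token in enumerate(tokens):
--         if keyword_lower in token.lower():
--             return i
--
--     # 找不到的話，檢查是否跨 token
--     combined = ""
--     for i, token in enumerate(tokens):
--         combined += token.lower()
--         if keyword_lower in combined:
--             return i
--
--     return len(tokens) // 2  # fallback
-- ===== SOURCE B (Python) =====
-- def _estimate_position(tokens: list[str], keyword: str) -> int: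
--     keyword_lower = keyword.lower()
--
--     for i, token in enumerate(tokens):
--         if keyword_lower in token.lower():
--             return i
--
--     # cross-token: join once, find once, map the match end back to a token index
--     lowered = [t.lower() for t in tokens]
--     joined = "".join(lowered)
--     pos = joined.find(keyword_lower)
--     if pos != -1:
--         end = pos + len(keyword_lower)
--         cum = 0
--         for i, t in enumerate(lowered):
--             cum += len(t)
--             if cum >= end:
--                 return i
--
--     return len(tokens) // 2
-- ===== Notes on version B (the rewrite author's own statement) =====
-- stated objective: faster
-- what changed: A's cross-token fallback rebuilds the cumulative concatenation and re-searches it for every token (quadratic); B joins the lowered tokens once, runs one substring find on the joined string, and maps the match-end offset back to the first token index whose cumulative length reaches it.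
import Mathlib
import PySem

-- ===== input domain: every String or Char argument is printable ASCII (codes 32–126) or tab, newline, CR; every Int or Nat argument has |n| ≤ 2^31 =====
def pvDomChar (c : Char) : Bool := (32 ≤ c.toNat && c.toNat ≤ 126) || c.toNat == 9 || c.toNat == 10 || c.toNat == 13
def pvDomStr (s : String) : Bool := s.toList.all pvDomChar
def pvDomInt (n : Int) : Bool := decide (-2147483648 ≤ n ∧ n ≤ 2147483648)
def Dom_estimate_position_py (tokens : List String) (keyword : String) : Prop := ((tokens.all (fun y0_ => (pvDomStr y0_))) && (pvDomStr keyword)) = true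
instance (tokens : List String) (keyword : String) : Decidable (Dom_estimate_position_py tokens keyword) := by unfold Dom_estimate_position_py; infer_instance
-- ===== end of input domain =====

-- B replaces A's quadratic cumulative-concat fallback by one join + one find + a prefix-length scan
-- mapping the match end back to a token index (objective: faster on the cross-token fallback).

-- ===== PORT A =====
-- first loop: return first i with keyword_lower in token.lower()
def epA_scan1 (tokens : List String) (kw : List Char) (i : Nat) : Option Int :=
  match tokens with
  | [] => none
  | t :: rest =>
    if PySem.Chars.isIn kw (PySem.Chars.lower t.toList) then some (i : Int)
    else epA_scan1 rest kw (i + 1)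

-- second loop: combined += token.lower(); return first i with keyword_lower in combined
def epA_scan2 (tokens : List String) (kw : List Char) (combined : List Char) (i : Nat) : Option Int :=
  match tokens with
  | [] => none
  | t :: rest =>
    if PySem.Chars.isIn kw (combined ++ PySem.Chars.lower t.toList) then some (i : Int)
    else epA_scan2 rest kw (combined ++ PySem.Chars.lower t.toList) (i + 1)

def estimate_position_py (tokens : List String) (keyword : String) : Int :=
  match epA_scan1 tokens (PySem.Chars.lower keyword.toList) 0 with
  | some i => i
  | none =>
    match epA_scan2 tokens (PySem.Chars.lower keyword.toList) [] 0 with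
    | some i => i
    | none => PySem.Int.floordiv (tokens.length : Int) 2

-- ===== PORT B =====
-- first loop of B (same single-token scan as in the Python B)
def epB_scan1 (tokens : List String) (kw : List Char) (i : Nat) : Option Int :=
  match tokens with
  | [] => none
  | t :: rest =>
    if PySem.Chars.isIn kw (PySem.Chars.lower t.toList) then some (i : Int)
    else epB_scan1 rest kw (i + 1)

-- map the character offset `endPos` of the match end to the first token index whose
-- cumulative lowered length reaches it
def epB_findIdx (lowered : List (List Char)) (endPos : Nat) (cum : Nat) (i : Nat) : Option Int :=
  match lowered with
  | [] => none
  | t :: rest =>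
    if endPos ≤ cum + t.length then some (i : Int)
    else epB_findIdx rest endPos (cum + t.length) (i + 1)

-- the cross-token branch of B: join once, find once, map the offset back
def epB_fallback (tokens : List String) (kw : List Char) : Int :=
  let lowered := tokens.map (fun t => PySem.Chars.lower t.toList)
  let pos := PySem.Chars.find lowered.flatten kw
  if pos ≠ -1 then
    match epB_findIdx lowered (pos.toNat + kw.length) 0 0 with
    | some i => i
    | none => PySem.Int.floordiv (tokens.length : Int) 2
  else PySem.Int.floordiv (tokens.length : Int) 2

def estimate_position_py_alt (tokens : List String) (keyword : String) : Int :=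
  match epB_scan1 tokens (PySem.Chars.lower keyword.toList) 0 with
  | some i => i
  | none => epB_fallback tokens (PySem.Chars.lower keyword.toList)

-- ===== PRECONDITION & SPEC =====
def Spec_estimate_position_py (tokens : List String) (keyword : String) (out : Int) : Prop := out = estimate_position_py_alt tokens keyword
instance (tokens : List String) (keyword : String) (out : Int) : Decidable (Spec_estimate_position_py tokens keyword out) := by unfold Spec_estimate_position_py; infer_instance

-- ===== CLAIM (what is proved, stated in full; the proofs are below) =====
def Claim_equal_estimate_position_py : Prop := ∀ (tokens : List String) (keyword : String), Dom_estimate_position_py tokens keyword → Spec_estimate_position_py tokens keyword (estimate_position_py tokens keyword)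

-- ===== LEMMAS AND PROOFS =====

-- the two first scans are the same loop
lemma scan1_eq (tokens : List String) (kw : List Char) (i : Nat) :
    epB_scan1 tokens kw i = epA_scan1 tokens kw i := by
  induction tokens generalizing i with
  | nil => rfl
  | cons t rest ih => simp [epA_scan1, epB_scan1, ih]

-- `kw in s[:L]` iff the first occurrence of kw in s ends no later than L
lemma isIn_take_iff (s kw : List Char) (L : Nat) :
    PySem.Chars.isIn kw (s.take L) = true ↔
      0 ≤ PySem.Chars.find s kw ∧ (PySem.Chars.find s kw).toNat + kw.length ≤ L := by
  by_cases hkw : kw = []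
  · subst hkw
    simp [PySem.Chars.isIn_nil, PySem.Chars.find_nil]
  · constructor
    · intro h
      rw [← PySem.Chars.exists_prefix_drop_iff_isIn] at h
      obtain ⟨j, hj⟩ := h
      rw [List.drop_take, List.prefix_take_iff] at hj
      obtain ⟨hpre, hlen⟩ := hj
      have hin : PySem.Chars.isIn kw s = true :=
        (PySem.Chars.exists_prefix_drop_iff_isIn (s := s) (sub := kw)).1 ⟨j, hpre⟩
      have hnn : 0 ≤ PySem.Chars.find s kw := by
        rw [PySem.Chars.find_nonneg_iff, ← PySem.Chars.isIn_iff_infix]; exact hin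
      refine ⟨hnn, ?_⟩
      obtain ⟨hp, hmin⟩ := PySem.Chars.find_spec (s := s) (sub := kw) hnn
      have hple : (PySem.Chars.find s kw).toNat ≤ j := by
        by_contra hlt
        exact hmin j (by omega) hpre
      have hk1 : 1 ≤ kw.length := by
        cases kw with
        | nil => exact absurd rfl hkw
        | cons a l => simp
      omega
    · rintro ⟨hnn, hle⟩
      obtain ⟨hp, _⟩ := PySem.Chars.find_spec (s := s) (sub := kw) hnn
      rw [← PySem.Chars.exists_prefix_drop_iff_isIn]
      refine ⟨(PySem.Chars.find s kw).toNat, ?_⟩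
      rw [List.drop_take, List.prefix_take_iff]
      exact ⟨hp, by omega⟩

-- main invariant: A's cumulative loop over the remaining tokens computes exactly
-- B's find-then-map-offset expression, relative to the already accumulated prefix c
lemma scan2_eq_findIdx (tokens : List String) (kw c : List Char) (i : Nat)
    (hc : PySem.Chars.isIn kw c = false) :
    epA_scan2 tokens kw c i =
      (if PySem.Chars.find (c ++ (tokens.map (fun t => PySem.Chars.lower t.toList)).flatten) kw = -1
       then none
       else epB_findIdx (tokens.map (fun t => PySem.Chars.lower t.toList))
         ((PySem.Chars.find (c ++ (tokens.map (fun t => PySem.Chars.lower t.toList)).flatten) kw).toNat + kw.length)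
         c.length i) := by
  induction tokens generalizing c i with
  | nil =>
    have : PySem.Chars.find c kw = -1 := by
      rw [PySem.Chars.find_eq_neg_one_iff, ← PySem.Chars.isIn_eq_false_iff]; exact hc
    simp [epA_scan2, this]
  | cons t rest ih =>
    simp only [epA_scan2, List.map_cons, List.flatten_cons, ← List.append_assoc]
    set lt := PySem.Chars.lower t.toList with hlt
    set M := rest.map (fun t => PySem.Chars.lower t.toList) with hM
    set s := (c ++ lt) ++ M.flatten with hs
    have htake : s.take (c ++ lt).length = c ++ lt := List.take_left
    have hlen : (c ++ lt).length = c.length + lt.length := List.length_append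
    by_cases h : PySem.Chars.isIn kw (c ++ lt) = true
    · rw [if_pos h]
      obtain ⟨hnn, hle⟩ := (isIn_take_iff s kw (c ++ lt).length).1 (by rw [htake]; exact h)
      have hne : PySem.Chars.find s kw ≠ -1 := by omega
      rw [if_neg hne]
      simp only [epB_findIdx]
      rw [if_pos (by omega)]
    · have h' : PySem.Chars.isIn kw (c ++ lt) = false := by
        revert h; cases PySem.Chars.isIn kw (c ++ lt) <;> simp
      rw [if_neg h, ih (c ++ lt) (i + 1) h']
      by_cases hneg : PySem.Chars.find s kw = -1
      · rw [if_pos hneg, if_pos hneg]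
      · rw [if_neg hneg, if_neg hneg]
        have hnn : 0 ≤ PySem.Chars.find s kw := by
          have := PySem.Chars.neg_one_le_find (s := s) (sub := kw); omega
        have hgt : ¬ ((PySem.Chars.find s kw).toNat + kw.length ≤ (c ++ lt).length) := by
          intro hx
          have hin := (isIn_take_iff s kw (c ++ lt).length).2 ⟨hnn, hx⟩
          rw [htake] at hin
          simp [hin] at h'
        simp only [epB_findIdx]
        rw [if_neg (by omega), hlen]

-- ===== VERDICT (by name: the statement is the Claim_ definition above) =====
theorem estimate_position_py_spec : Claim_equal_estimate_position_py := by
  intro tokens keyword _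
  unfold Spec_estimate_position_py estimate_position_py estimate_position_py_alt
  rw [scan1_eq]
  cases h1 : epA_scan1 tokens (PySem.Chars.lower keyword.toList) 0 with
  | some i => rfl
  | none =>
    simp only
    cases tokens with
    | nil => simp [epA_scan2, epB_fallback, epB_findIdx]
    | cons t rest =>
      set kw := PySem.Chars.lower keyword.toList with hkw
      have hkwne : kw ≠ [] := by
        intro hx
        have : PySem.Chars.isIn kw (PySem.Chars.lower t.toList) = true := by
          rw [hx]; exact PySem.Chars.isIn_nil _
        simp [epA_scan1, this] at h1
      have hc : PySem.Chars.isIn kw [] = false := by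
        rw [PySem.Chars.isIn_eq_false_iff]
        intro hx
        exact hkwne (List.eq_nil_of_infix_nil hx)
      rw [scan2_eq_findIdx (t :: rest) kw [] 0 hc]
      simp only [List.nil_append, List.length_nil, List.map_cons, List.flatten_cons]
      by_cases hx : PySem.Chars.find (PySem.Chars.lower t.toList ++ (rest.map (fun t => PySem.Chars.lower t.toList)).flatten) kw = -1
      · simp [epB_fallback, hx]
      · simp [epB_fallback, hx]
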